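-- pv_equiv track=rewrite | github.com/lizhiyi666/original | tools/ovr_diagnostics.py | min_max_positions
-- ===== SOURCE A (Python) =====
-- from typing import Dict, List, Tuple
--
-- def min_max_positions(cats: List) -> Tuple[Dict, Dict]:
--     min_pos = {}
--     max_pos = {}
--     for i, c in enumerate(cats):
--         if c is None:
--             continue
--         if c not in min_pos:
--             min_pos[c] = i
--             max_pos[c] = i
--         else:
--             max_pos[c] = i
--     return min_pos, max_pos
-- ===== SOURCE B (Python) =====
-- def min_max_positions(cats):
--     groups = {}
--     for i, c in enumerate(cats):
--         if c is not None:
--             groups.setdefault(c, []).append(i)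
--     min_pos = {c: idxs[0] for c, idxs in groups.items()}
--     max_pos = {c: idxs[-1] for c, idxs in groups.items()}
--     return min_pos, max_pos
-- ===== Notes on version B (the rewrite author's own statement) =====
-- stated objective: alternative
-- what changed: B groups all occurrence indices per category into one dict of lists in a single pass, then derives min_pos/max_pos as two comprehensions (first/last element of each list), instead of A's interleaved scalar first/last bookkeeping with a membership test per element.
import Mathlib
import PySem

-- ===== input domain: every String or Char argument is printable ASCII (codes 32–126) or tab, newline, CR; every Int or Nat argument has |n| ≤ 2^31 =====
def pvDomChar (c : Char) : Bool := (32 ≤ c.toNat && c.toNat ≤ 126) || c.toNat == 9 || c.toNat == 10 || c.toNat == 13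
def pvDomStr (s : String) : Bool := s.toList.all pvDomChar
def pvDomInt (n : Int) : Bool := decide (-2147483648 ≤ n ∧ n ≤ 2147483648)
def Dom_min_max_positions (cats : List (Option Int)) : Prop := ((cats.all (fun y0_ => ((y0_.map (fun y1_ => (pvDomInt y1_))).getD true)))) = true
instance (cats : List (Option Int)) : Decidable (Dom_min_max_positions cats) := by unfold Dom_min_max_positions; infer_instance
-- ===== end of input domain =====

-- B differs from A only in decomposition (grouping pass then two reductions); same O(n) cost, same results.

-- ===== PORT A =====
-- one loop step of A: skip None; first occurrence sets both dicts, later ones only max_pos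
def stepA (st : PySem.Dict Int Int × PySem.Dict Int Int) (p : Int × Option Int) :
    PySem.Dict Int Int × PySem.Dict Int Int :=
  match p.2 with
  | none => st
  | some c =>
    if st.1.contains c = false then (st.1.insert c p.1, st.2.insert c p.1)
    else (st.1, st.2.insert c p.1)

def min_max_positions (cats : List (Option Int)) : (List (Int × Int)) × (List (Int × Int)) :=
  let st := (PySem.List.enumerate cats 0).foldl stepA (PySem.Dict.empty, PySem.Dict.empty)
  (st.1.items, st.2.items)

-- ===== PORT B =====
-- one loop step of B: groups.setdefault(c, []).append(i)
def stepB (g : PySem.Dict Int (List Int)) (p : Int × Option Int) : PySem.Dict Int (List Int) :=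
  match p.2 with
  | none => g
  | some c => g.modify c [] (· ++ [p.1])

def min_max_positions_alt (cats : List (Option Int)) : (List (Int × Int)) × (List (Int × Int)) :=
  let groups := (PySem.List.enumerate cats 0).foldl stepB PySem.Dict.empty
  (groups.items.map (fun p => (p.1, PySem.List.pyGetD p.2 0 0)),
   groups.items.map (fun p => (p.1, PySem.List.pyGetD p.2 (-1) 0)))

-- ===== PRECONDITION & SPEC =====
def Spec_min_max_positions (cats : List (Option Int)) (out : (List (Int × Int)) × (List (Int × Int))) : Prop := out = min_max_positions_alt cats
instance (cats : List (Option Int)) (out : (List (Int × Int)) × (List (Int × Int))) : Decidable (Spec_min_max_positions cats out) := by unfold Spec_min_max_positions; infer_instance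

-- ===== CLAIM (what is proved, stated in full; the proofs are below) =====
def Claim_equal_min_max_positions : Prop := ∀ (cats : List (Option Int)), Dom_min_max_positions cats → Spec_min_max_positions cats (min_max_positions cats)

-- ===== LEMMAS AND PROOFS =====

-- loop invariant: A's two dicts are the head/last projections of B's groups dict
def InvAB (d1 d2 : PySem.Dict Int Int) (g : PySem.Dict Int (List Int)) : Prop :=
  d1.items = g.items.map (fun p => (p.1, PySem.List.pyGetD p.2 0 0)) ∧
  d2.items = g.items.map (fun p => (p.1, PySem.List.pyGetD p.2 (-1) 0)) ∧
  g.keys.Nodup ∧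
  ∀ p ∈ g.items, p.2 ≠ []

lemma keys_eq_of_inv {d1 d2 : PySem.Dict Int Int} {g : PySem.Dict Int (List Int)}
    (h : InvAB d1 d2 g) : d1.keys = g.keys := by
  obtain ⟨h1, -, -, -⟩ := h
  simp [PySem.Dict.keys, h1]

lemma inv_step (d1 d2 : PySem.Dict Int Int) (g : PySem.Dict Int (List Int))
    (p : Int × Option Int) (h : InvAB d1 d2 g) :
    InvAB (stepA (d1, d2) p).1 (stepA (d1, d2) p).2 (stepB g p) := by
  obtain ⟨h1, h2, hnd, hne⟩ := h
  obtain ⟨i, c⟩ := p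
  match c with
  | none => exact ⟨h1, h2, hnd, hne⟩
  | some c =>
    have hkeys : d1.keys = g.keys := keys_eq_of_inv ⟨h1, h2, hnd, hne⟩
    have hk2 : d2.keys = g.keys := by simp [PySem.Dict.keys, h2]
    have hcont : d1.contains c = g.contains c := by
      rw [PySem.Dict.contains_eq_decide_mem_keys, PySem.Dict.contains_eq_decide_mem_keys, hkeys]
    have hmod : stepB g (i, some c) = g.insert c (g.getD c [] ++ [i]) := rfl
    by_cases hc : g.contains c = true
    · -- key already present: only max_pos / the group's list changes
      have hval : ∀ v, (c, v) ∈ g.items → g.getD c [] = v := fun v hv =>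
        PySem.Dict.getD_of_mem_items g hv hnd []
      have hitems := PySem.Dict.items_insert_of_contains g (g.getD c [] ++ [i]) hc
      have hcontd2 : d2.contains c = true := by
        rw [PySem.Dict.contains_eq_decide_mem_keys, hk2]
        rw [PySem.Dict.contains_eq_decide_mem_keys] at hc
        exact hc
      have hA : stepA (d1, d2) (i, some c) = (d1, d2.insert c i) := by
        simp [stepA, hcont, hc]
      rw [hA, hmod]
      refine ⟨?_, ?_, ?_, ?_⟩
      · -- min side unchanged
        show d1.items = _
        rw [h1, hitems, List.map_map]
        apply List.map_congr_left
        intro q hq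
        obtain ⟨qk, qv⟩ := q
        by_cases hqc : qk = c
        · have hv : g.getD c [] = qv := hval qv (by rw [← hqc]; exact hq)
          have hqne : qv ≠ [] := hne (qk, qv) hq
          have hh : PySem.List.pyGetD (qv ++ [i]) 0 0 = PySem.List.pyGetD qv 0 0 := by
            cases qv with
            | nil => exact absurd rfl hqne
            | cons a t => simp [PySem.List.pyGetD_zero_cons]
          simp [Function.comp, hqc, ← hv, hv ▸ hh]
        · simp [Function.comp, hqc]
      · -- max side: updated entry gets i
        show (d2.insert c i).items = _
        rw [PySem.Dict.items_insert_of_contains d2 i hcontd2, h2, hitems,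
            List.map_map, List.map_map]
        apply List.map_congr_left
        intro q hq
        by_cases hqc : q.1 = c
        · have hv : g.getD c [] = q.2 := hval q.2 (by rw [← hqc]; exact hq)
          simp [Function.comp, hqc, PySem.List.pyGetD_neg_one_append_singleton]
        · simp [Function.comp, hqc]
      · exact PySem.Dict.nodup_keys_insert g c _ hnd
      · intro q hq
        rw [hitems] at hq
        obtain ⟨r, hr, hrq⟩ := List.mem_map.mp hq
        by_cases hrc : (r.1 == c) = true
        · simp [hrc] at hrq; rw [← hrq]; simp
        · simp [hrc] at hrq; rw [← hrq]; exact hne r hr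
    · -- fresh key: all three dicts append
      have hcgf : g.contains c = false := by simpa using hc
      have hcdf : d1.contains c = false := by rw [hcont]; exact hcgf
      have hcontd2 : d2.contains c = false := by
        rw [PySem.Dict.contains_eq_decide_mem_keys, hk2]
        rw [PySem.Dict.contains_eq_decide_mem_keys, hkeys] at hcdf
        exact hcdf
      have hgd : g.getD c [] = [] := PySem.Dict.getD_of_not_contains g [] hcgf
      have hA : stepA (d1, d2) (i, some c) = (d1.insert c i, d2.insert c i) := by
        simp [stepA, hcdf]
      rw [hA, hmod]
      refine ⟨?_, ?_, ?_, ?_⟩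
      · show (d1.insert c i).items = _
        rw [PySem.Dict.items_insert_of_not_contains d1 i hcdf,
            PySem.Dict.items_insert_of_not_contains g _ hcgf, h1, hgd]
        simp [PySem.List.pyGetD_zero_cons]
      · show (d2.insert c i).items = _
        rw [PySem.Dict.items_insert_of_not_contains d2 i hcontd2,
            PySem.Dict.items_insert_of_not_contains g _ hcgf, h2, hgd]
        have hlast : PySem.List.pyGetD ([] ++ [i]) (-1) 0 = i :=
          PySem.List.pyGetD_neg_one_append_singleton [] i 0
        simp only [List.nil_append] at hlast
        simp [hlast]
      · exact PySem.Dict.nodup_keys_insert g c _ hnd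
      · intro q hq
        rw [PySem.Dict.items_insert_of_not_contains g _ hcgf] at hq
        rcases List.mem_append.mp hq with h' | h'
        · exact hne q h'
        · simp at h'; rw [h']; simp [hgd]

lemma inv_fold (l : List (Int × Option Int)) :
    ∀ (d1 d2 : PySem.Dict Int Int) (g : PySem.Dict Int (List Int)), InvAB d1 d2 g →
    InvAB (l.foldl stepA (d1, d2)).1 (l.foldl stepA (d1, d2)).2 (l.foldl stepB g) := by
  induction l with
  | nil => intro d1 d2 g h; exact h
  | cons p t ih =>
    intro d1 d2 g h
    have := inv_step d1 d2 g p h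
    simpa [List.foldl_cons] using ih (stepA (d1, d2) p).1 (stepA (d1, d2) p).2 (stepB g p) this

-- ===== VERDICT (by name: the statement is the Claim_ definition above) =====
theorem min_max_positions_spec : Claim_equal_min_max_positions := by
  intro cats _
  unfold Spec_min_max_positions min_max_positions min_max_positions_alt
  have h0 : InvAB PySem.Dict.empty PySem.Dict.empty PySem.Dict.empty :=
    ⟨rfl, rfl, by simp [PySem.Dict.keys_empty], by intro p hp; simp [PySem.Dict.empty] at hp⟩
  obtain ⟨h1, h2, -, -⟩ := inv_fold (PySem.List.enumerate cats 0)
    PySem.Dict.empty PySem.Dict.empty PySem.Dict.empty h0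
  exact Prod.ext h1 h2
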